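-- pv_equiv track=rewrite | github.com/miliar/Code_Jam_Webscraper | Solutions_python/Problem_181/940.py | solve
-- ===== SOURCE A (Python) =====
-- def solve(word):
--     if len(word) == 1:
--         return word
--     s = [word[0]]
--     for c in word[1:]:
--         if ord(c) < ord(s[0]):
--             s.append(c)
--         else:
--             s = [c] + s
--     return "".join(s)
-- ===== SOURCE B (Python) =====
-- def solve(word):
--     # A char belongs to the first (reversed) part exactly when it is >= every char
--     # before it (a prefix maximum); such chars are emitted in reverse,
--     # the remaining chars in original order.
--     n = len(word)
--     rec = [i for i in range(n) if all(word[j] <= word[i] for j in range(i))]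
--     other = [i for i in range(n) if not all(word[j] <= word[i] for j in range(i))]
--     return ''.join(word[i] for i in reversed(rec)) + ''.join(word[i] for i in other)
-- ===== Notes on version B (the rewrite author's own statement) =====
-- stated objective: alternative
-- what changed: Replaces A's stateful simulation (one list mutated by head-compare prepend/append) with a stateless characterization: an index is a prefix-maximum position iff its char is >= every earlier char (a prefix maximum); the result is built from two index comprehensions, the prefix-maximum chars reversed, then the rest in order.
-- outside the precondition, e.g. on solve(''): A raises IndexError, B returns ''
import Mathlib
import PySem

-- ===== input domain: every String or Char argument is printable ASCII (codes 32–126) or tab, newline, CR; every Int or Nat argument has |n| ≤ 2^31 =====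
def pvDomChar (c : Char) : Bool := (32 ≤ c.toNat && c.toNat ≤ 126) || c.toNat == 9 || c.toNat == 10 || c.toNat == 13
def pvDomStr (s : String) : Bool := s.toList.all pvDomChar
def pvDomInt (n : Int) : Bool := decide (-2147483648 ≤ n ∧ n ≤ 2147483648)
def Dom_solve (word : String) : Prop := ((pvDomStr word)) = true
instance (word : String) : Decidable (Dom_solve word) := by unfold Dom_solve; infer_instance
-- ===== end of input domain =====

-- B replaces A's stateful head-compare prepend/append simulation by a stateless
-- characterization (front = prefix-maximum positions) built from two index
-- comprehensions (objective: alternative).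

-- ===== PORT A =====
-- A's loop body: append when ord(c) < ord(s[0]), else prepend.
def solveStepA (s : List Char) (c : Char) : List Char :=
  if c.toNat < (s.headD ' ').toNat then s ++ [c] else c :: s

def solve (word : String) : String :=
  match word.toList with
  | [] => ""   -- Python raises IndexError here (word[0]); excluded by Pre_solve
  | h :: t =>
    if (h :: t).length == 1 then word
    else String.ofList (t.foldl solveStepA [h])

-- ===== PORT B =====
-- Source B's test 'all(word[j] <= word[i] for j in range(i))'
def isRecB (l : List Char) (i : Nat) : Bool :=
  (List.range i).all (fun j => (l.getD j ' ').toNat ≤ (l.getD i ' ').toNat)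

def solve_alt (word : String) : String :=
  let l := word.toList
  let n := l.length
  let rec_ := (List.range n).filter (fun i => isRecB l i)
  let other := (List.range n).filter (fun i => !(isRecB l i))
  String.ofList (rec_.reverse.map (fun i => l.getD i ' ') ++ other.map (fun i => l.getD i ' '))

-- ===== PRECONDITION & SPEC =====
-- A raises IndexError on the empty string (word[0]); excluded. B returns "" there.
def Pre_solve (word : String) : Prop := word ≠ ""
instance (word : String) : Decidable (Pre_solve word) := by unfold Pre_solve; infer_instance
def pvWitness_solve : String := "ba"

def Spec_solve (word : String) (out : String) : Prop := out = solve_alt word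
instance (word : String) (out : String) : Decidable (Spec_solve word out) := by unfold Spec_solve; infer_instance

-- ===== CLAIM (what is proved, stated in full; the proofs are below) =====
def Claim_equal_solve : Prop := ∀ (word : String), Dom_solve word → Pre_solve word → Spec_solve word (solve word)

-- ===== LEMMAS AND PROOFS =====

-- A's final list on nonempty input h :: t
def afin (l : List Char) : List Char :=
  match l with
  | [] => []
  | h :: t => t.foldl solveStepA [h]

-- chars of B's two index comprehensions
def recChars (l : List Char) : List Char :=
  ((List.range l.length).filter (fun i => isRecB l i)).map (fun i => l.getD i ' ')
def othChars (l : List Char) : List Char :=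
  ((List.range l.length).filter (fun i => !(isRecB l i))).map (fun i => l.getD i ' ')

theorem afin_append (h c : Char) (t : List Char) :
    afin ((h :: t) ++ [c]) = solveStepA (afin (h :: t)) c := by
  simp [afin, List.foldl_append]

-- isRecB is stable under appending a char, at old indices
theorem isRecB_append (l : List Char) (c : Char) (i : Nat) (hi : i < l.length) :
    isRecB (l ++ [c]) i = isRecB l i := by
  unfold isRecB
  rw [List.getD_append _ _ _ _ hi]
  apply Bool.eq_iff_iff.mpr
  simp only [List.all_eq_true, List.mem_range]
  refine forall_congr' (fun j => imp_congr_right (fun hj => ?_))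
  rw [List.getD_append _ _ _ _ (lt_trans hj hi)]

-- main invariant, by induction from the right
theorem main_inv (l : List Char) (hne : l ≠ []) :
    afin l = (recChars l).reverse ++ othChars l ∧
      ∃ m, (afin l).head? = some m ∧ m ∈ l ∧ ∀ x ∈ l, x.toNat ≤ m.toNat := by
  induction l using List.reverseRecOn with
  | nil => exact absurd rfl hne
  | append_singleton l c ih =>
    cases l with
    | nil =>
      refine ⟨?_, c, rfl, by simp, by simp⟩
      simp [afin, recChars, othChars, isRecB]
    | cons h t =>
      obtain ⟨heq, m, hhd, hmem, hmax⟩ := ih (by simp)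
      set L := h :: t with hL
      have hlen : (L ++ [c]).length = L.length + 1 := by simp
      -- split range (n+1)
      have hrange : List.range (L.length + 1) = List.range L.length ++ [L.length] :=
        List.range_succ
      -- new index char
      have hgetn : (L ++ [c]).getD L.length ' ' = c := by
        simp
      -- filters over old indices unchanged, chars unchanged
      have hfilt : ∀ (p : Nat → Bool),
          ((List.range L.length).filter (fun i => p i)).map
              (fun i => (L ++ [c]).getD i ' ')
            = ((List.range L.length).filter (fun i => p i)).map (fun i => L.getD i ' ') := by
        intro p
        apply List.map_congr_left
        intro i hi
        have hi' : i < L.length := List.mem_range.mp (List.mem_of_mem_filter hi)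
        rw [List.getD_append _ _ _ _ hi']
      have hfiltP : ∀ (f : Bool → Bool),
          (List.range L.length).filter (fun i => f (isRecB (L ++ [c]) i))
            = (List.range L.length).filter (fun i => f (isRecB L i)) := by
        intro f
        apply List.filter_congr
        intro i hi
        rw [isRecB_append _ _ _ (List.mem_range.mp hi)]
      -- the new index is a record iff c ≥ max of L iff ¬ (c < head of A's state)
      have hnewRec : isRecB (L ++ [c]) L.length = decide (m.toNat ≤ c.toNat) := by
        unfold isRecB
        rw [hgetn]
        by_cases hc : m.toNat ≤ c.toNat
        · simp only [hc, decide_true]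
          apply List.all_eq_true.mpr
          intro j hj
          have hj' : j < L.length := List.mem_range.mp hj
          rw [List.getD_append _ _ _ _ hj']
          have : L.getD j ' ' ∈ L := by
            rw [List.getD_eq_getElem _ _ hj']; exact List.getElem_mem _
          exact decide_eq_true (le_trans (hmax _ this) hc)
        · simp only [hc, decide_false]
          apply List.all_eq_false.mpr
          obtain ⟨k, hk, hkm⟩ := List.getElem_of_mem hmem
          refine ⟨k, List.mem_range.mpr hk, ?_⟩
          rw [List.getD_append _ _ _ _ hk]
          have : L.getD k ' ' = m := by rw [List.getD_eq_getElem _ _ hk, hkm]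
          rw [this]
          simp [hc]
      have hhead : (afin L).headD ' ' = m := by
        cases hA : afin L with
        | nil => rw [hA] at hhd; simp at hhd
        | cons a s => rw [hA] at hhd; simp at hhd; simp [hhd]
      constructor
      · rw [afin_append, heq]
        unfold solveStepA
        rw [heq] at hhead
        rw [hhead]
        unfold recChars othChars
        rw [hlen, hrange]
        rw [List.filter_append, List.filter_append]
        simp only [List.filter_cons, List.filter_nil, hnewRec]
        rw [List.map_append, List.map_append, hfiltP (fun b => b), hfiltP (fun b => !b),
          hfilt, hfilt]
        by_cases hc : c.toNat < m.toNat
        · have : decide (m.toNat ≤ c.toNat) = false := by simp; omega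
          simp only [this, Bool.not_false, if_pos hc, if_true]
          simp
        · have : decide (m.toNat ≤ c.toNat) = true := by simp; omega
          simp only [this, Bool.not_true, if_neg hc]
          simp
      · by_cases hc : c.toNat < m.toNat
        · refine ⟨m, ?_, by simp [hmem], ?_⟩
          · rw [afin_append]
            unfold solveStepA
            rw [hhead, if_pos hc]
            cases hA : afin L with
            | nil => rw [hA] at hhd; simp at hhd
            | cons a s => rw [hA] at hhd; simpa using hhd
          · intro x hx
            rcases List.mem_append.mp hx with hx | hx
            · exact hmax _ hx
            · simp at hx; subst hx; omega
        · refine ⟨c, ?_, by simp, ?_⟩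
          · rw [afin_append]
            unfold solveStepA
            rw [hhead, if_neg hc]
            rfl
          · intro x hx
            rcases List.mem_append.mp hx with hx | hx
            · exact le_trans (hmax _ hx) (by omega)
            · simp at hx; subst hx; omega

theorem solve_eq_on_list (l : List Char) (hne : l ≠ []) :
    solve (String.ofList l) = solve_alt (String.ofList l) := by
  unfold solve solve_alt
  rw [String.toList_ofList]
  cases l with
  | nil => exact absurd rfl hne
  | cons h t =>
    have hB : (recChars (h :: t)).reverse ++ othChars (h :: t) =
        ((List.range (h :: t).length).filter (fun i => isRecB (h :: t) i)).reverse.map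
            (fun i => (h :: t).getD i ' ')
          ++ ((List.range (h :: t).length).filter (fun i => !(isRecB (h :: t) i))).map
            (fun i => (h :: t).getD i ' ') := by
      simp [recChars, othChars, List.map_reverse]
    cases t with
    | nil =>
      simp [isRecB, List.filter]
    | cons c t =>
      have hlen : ((h :: c :: t).length == 1) = false := by simp
      simp only [hlen, Bool.false_eq_true, if_false]
      have h1 := (main_inv (h :: c :: t) (by simp)).1
      rw [← hB, ← h1]
      rfl

-- ===== VERDICT (by name: the statement is the Claim_ definition above) =====
theorem solve_spec : Claim_equal_solve := by
  intro word _ hpre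
  unfold Spec_solve
  rw [← String.ofList_toList (s := word)]
  exact solve_eq_on_list word.toList (by
    intro h
    exact hpre (by
      have := congrArg String.ofList h
      rwa [String.ofList_toList] at this))
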